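-- pv_equiv track=rewrite | github.com/sradiouy/deNovoTEsDmel | Scritps/TE_transfer.py | get_m_values
-- ===== SOURCE A (Python) =====
-- def get_m_values(cigartuples):
--     m_values = []
--     suma = 0
--     for index,cigar_tuple in enumerate(cigartuples):
--         if cigar_tuple[0] == 0 or cigar_tuple[0] == 1 or cigar_tuple[0] == 4:
--             suma += cigar_tuple[1]
--         elif cigar_tuple[0] == 2:
--             pass
--         elif cigar_tuple[0] == 3:
--             m_values.append(suma)
--             suma = 0
--         if index == len(cigartuples)-1:
--             m_values.append(suma)
--     return m_values
-- ===== SOURCE B (Python) =====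
-- def get_m_values(cigartuples):
--     if not cigartuples:
--         return []
--     # prefix[i] = total consumed length (ops 0/1/4) among the first i tuples
--     prefix = [0]
--     total = 0
--     for op, length in cigartuples:
--         if op == 0 or op == 1 or op == 4:
--             total += length
--         prefix.append(total)
--     # segment boundaries: start, each position just after an N (op 3), end
--     cuts = [0] + [i + 1 for i, (op, _) in enumerate(cigartuples) if op == 3] + [len(cigartuples)]
--     return [prefix[b] - prefix[a] for a, b in zip(cuts, cuts[1:])]
-- ===== Notes on version B (the rewrite author's own statement) =====
-- stated objective: alternative
-- what changed: B computes a monotone prefix-sum array of consumed lengths plus the list of cut indices after each N (op 3), and returns differences of the prefix array at consecutive cuts, instead of A's single interleaved loop that resets an accumulator and emits on each op 3 with an is-last-index check.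
import Mathlib
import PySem

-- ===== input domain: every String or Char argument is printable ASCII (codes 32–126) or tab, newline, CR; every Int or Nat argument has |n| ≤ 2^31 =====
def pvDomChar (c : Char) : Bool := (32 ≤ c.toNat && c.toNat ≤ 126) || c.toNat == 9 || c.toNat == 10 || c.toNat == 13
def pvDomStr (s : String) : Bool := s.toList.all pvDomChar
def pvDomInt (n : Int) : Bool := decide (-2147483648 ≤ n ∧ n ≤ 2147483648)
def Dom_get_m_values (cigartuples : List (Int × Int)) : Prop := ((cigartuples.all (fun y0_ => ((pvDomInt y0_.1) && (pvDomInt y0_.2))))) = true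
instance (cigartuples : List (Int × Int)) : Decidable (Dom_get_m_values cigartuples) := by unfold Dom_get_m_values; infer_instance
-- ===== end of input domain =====

-- B replaces A's interleaved reset-and-emit loop (with an is-last-index check) by a
-- prefix-sum array over consumed lengths plus cut indices after each op-3, returning
-- differences of the prefix array at consecutive cuts.


-- ===== PORT A =====
-- loop body of A: the if/elif chain on the cigar op (pvAbody), then the
-- 'index == len(cigartuples)-1' final-append check (pvAstep)
def pvAbody (st : List Int × Int) (c : Int × Int) : List Int × Int :=
  if c.1 == 0 || c.1 == 1 || c.1 == 4 then (st.1, st.2 + c.2)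
  else if c.1 == 2 then st
  else if c.1 == 3 then (st.1 ++ [st.2], (0 : Int))
  else st

def pvAstep (n : Int) (st : List Int × Int) (p : Int × (Int × Int)) : List Int × Int :=
  let st1 := pvAbody st p.2
  if p.1 == n - 1 then (st1.1 ++ [st1.2], st1.2) else st1

def get_m_values (cigartuples : List (Int × Int)) : List Int :=
  ((PySem.List.enumerate cigartuples 0).foldl
    (pvAstep (cigartuples.length : Int)) ([], 0)).1

-- ===== PORT B =====
-- prefix-array loop: 'if op in (0,1,4): total += length; prefix.append(total)'
def pvBstep (st : List Int × Int) (c : Int × Int) : List Int × Int :=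
  let t := if c.1 == 0 || c.1 == 1 || c.1 == 4 then st.2 + c.2 else st.2
  (st.1 ++ [t], t)

-- cut list: '[0] + [i+1 for i,(op,_) in enumerate(ct) if op == 3] + [len(ct)]'
def pvCuts (xs : List (Int × Int)) : List Int :=
  [0] ++ ((PySem.List.enumerate xs 0).filterMap
            (fun p => if p.2.1 == 3 then some (p.1 + 1) else none))
      ++ [(xs.length : Int)]

-- '[prefix[b] - prefix[a] for a, b in zip(cuts, cuts[1:])]'
def pvDiffs (pre : List Int) (cuts : List Int) : List Int :=
  (cuts.zip cuts.tail).map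
    (fun p => (PySem.List.pyGet? pre p.2).getD 0 - (PySem.List.pyGet? pre p.1).getD 0)

def get_m_values_alt (cigartuples : List (Int × Int)) : List Int :=
  if cigartuples = [] then []
  else
    let pre := (cigartuples.foldl pvBstep ([0], 0)).1
    pvDiffs pre (pvCuts cigartuples)

-- ===== PRECONDITION & SPEC =====
def Spec_get_m_values (cigartuples : List (Int × Int)) (out : List Int) : Prop := out = get_m_values_alt cigartuples
instance (cigartuples : List (Int × Int)) (out : List Int) : Decidable (Spec_get_m_values cigartuples out) := by unfold Spec_get_m_values; infer_instance

-- ===== CLAIM =====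
def Claim_equal_get_m_values : Prop := ∀ (cigartuples : List (Int × Int)), Dom_get_m_values cigartuples → Spec_get_m_values cigartuples (get_m_values cigartuples)

-- ===== LEMMAS AND PROOFS =====

-- contribution of one tuple to the running sum
def pvContrib (c : Int × Int) : Int := if c.1 = 0 ∨ c.1 = 1 ∨ c.1 = 4 then c.2 else 0

-- common reference: list of segment sums, accumulator s
def pvSpec : List (Int × Int) → Int → List Int
  | [], s => [s]
  | x :: r, s => if x.1 = 3 then s :: pvSpec r 0 else pvSpec r (s + pvContrib x)

-- the abstract prefix list
def pvPrefixList : List (Int × Int) → Int → List Int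
  | [], t => [t]
  | x :: r, t => t :: pvPrefixList r (t + pvContrib x)

def pvCsum (xs : List (Int × Int)) : Int := (xs.map pvContrib).sum

-- relative cut positions
def pvCutsRel : List (Int × Int) → Int → List Int
  | [], _ => []
  | x :: r, k => (if x.1 = 3 then [k + 1] else []) ++ pvCutsRel r (k + 1)

-- pvDiffs with an abstract lookup function
def pvDiffsAbs (F : Int → Int) (cuts : List Int) : List Int :=
  (cuts.zip cuts.tail).map (fun p => F p.2 - F p.1)

lemma pvDiffsAbs_cons (F : Int → Int) (a b : Int) (rest : List Int) :
    pvDiffsAbs F (a :: b :: rest) = (F b - F a) :: pvDiffsAbs F (b :: rest) := by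
  simp [pvDiffsAbs]

lemma pvDiffsAbs_pair (F : Int → Int) (a b : Int) :
    pvDiffsAbs F [a, b] = [F b - F a] := by
  simp [pvDiffsAbs]

-- A's enumerated loop on a nonempty list = the plain op-chain fold, then append the final sum.
lemma aFold_eq (xs : List (Int × Int)) : ∀ (k n : Int) (st : List Int × Int),
    xs ≠ [] → k + (xs.length : Int) = n →
    (PySem.List.enumerate xs k).foldl (pvAstep n) st =
      ((xs.foldl pvAbody st).1 ++ [(xs.foldl pvAbody st).2], (xs.foldl pvAbody st).2) := by
  induction xs with
  | nil => intro _ _ _ h; exact absurd rfl h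
  | cons x tail ih =>
    intro k n st _ hlen
    simp only [List.length_cons] at hlen
    rw [PySem.List.enumerate_cons]
    cases tail with
    | nil =>
      have hk : (k == n - 1) = true := by
        simp only [beq_iff_eq]; simp only [List.length_nil] at hlen; push_cast at hlen; omega
      simp [pvAstep, hk]
    | cons y ys =>
      have hk : (k == n - 1) = false := by
        simp only [beq_eq_false_iff_ne, ne_eq]
        intro h; rw [h] at hlen
        simp only [List.length_cons] at hlen
        push_cast at hlen; omega
      have hstep : pvAstep n st (k, x) = pvAbody st x := by
        simp [pvAstep, hk]
      simp only [List.foldl_cons, hstep]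
      exact ih (k + 1) n (pvAbody st x) (by simp) (by push_cast at hlen ⊢; omega)

-- A's op-chain fold computes pvSpec
lemma aBody_spec (xs : List (Int × Int)) : ∀ (m : List Int) (s : Int),
    (xs.foldl pvAbody (m, s)).1 ++ [(xs.foldl pvAbody (m, s)).2] = m ++ pvSpec xs s := by
  induction xs with
  | nil => intro m s; simp [pvSpec]
  | cons x r ih =>
    intro m s
    simp only [List.foldl_cons]
    by_cases h3 : x.1 = 3
    · have hb : pvAbody (m, s) x = (m ++ [s], 0) := by simp [pvAbody, h3, pvContrib]
      rw [hb, ih]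
      simp [pvSpec, h3]
    · have hb : pvAbody (m, s) x = (m, s + pvContrib x) := by
        by_cases hm : x.1 = 0 ∨ x.1 = 1 ∨ x.1 = 4
        · rcases hm with h | h | h <;> simp [pvAbody, h, pvContrib]
        · push_neg at hm
          simp [pvAbody, h3, hm.1, hm.2.1, hm.2.2, pvContrib]
      rw [hb, ih]
      simp [pvSpec, h3]

-- B's prefix fold builds pvPrefixList
lemma bFold_prefix (xs : List (Int × Int)) : ∀ (acc : List Int) (t : Int),
    xs.foldl pvBstep (acc ++ [t], t) = (acc ++ pvPrefixList xs t, t + pvCsum xs) := by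
  induction xs with
  | nil => intro acc t; simp [pvPrefixList, pvCsum]
  | cons x r ih =>
    intro acc t
    have ht : pvBstep (acc ++ [t], t) x = ((acc ++ [t]) ++ [t + pvContrib x], t + pvContrib x) := by
      by_cases hm : x.1 = 0 ∨ x.1 = 1 ∨ x.1 = 4
      · rcases hm with h | h | h <;> simp [pvBstep, h, pvContrib]
      · push_neg at hm
        simp [pvBstep, hm.1, hm.2.1, hm.2.2, pvContrib]
    rw [List.foldl_cons, ht, ih]
    simp [pvPrefixList, pvCsum]
    ring
-- the enumerate/filterMap cut computation equals pvCutsRel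
lemma cuts_rel (xs : List (Int × Int)) : ∀ (k : Int),
    (PySem.List.enumerate xs k).filterMap
      (fun p => if p.2.1 == 3 then some (p.1 + 1) else none) = pvCutsRel xs k := by
  induction xs with
  | nil => intro k; simp [pvCutsRel, PySem.List.enumerate_nil]
  | cons x r ih =>
    intro k
    rw [PySem.List.enumerate_cons]
    by_cases h3 : x.1 = 3
    · simp only [List.filterMap_cons, h3, beq_self_eq_true, if_pos]
      simp [pvCutsRel, h3]
      simpa using ih (k + 1)
    · have hb : (x.1 == 3) = false := by simpa using h3
      simp only [List.filterMap_cons, hb]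
      simp [pvCutsRel, h3]
      simpa using ih (k + 1)

-- lookup into pvPrefixList at an in-range index
lemma prefixList_get (xs : List (Int × Int)) : ∀ (t : Int) (j : Nat), j ≤ xs.length →
    (pvPrefixList xs t)[j]? = some (t + pvCsum (xs.take j)) := by
  induction xs with
  | nil =>
    intro t j hj
    have hj0 : j = 0 := by simpa using hj
    subst hj0
    simp [pvPrefixList, pvCsum]
  | cons x r ih =>
    intro t j hj
    cases j with
    | zero => simp [pvPrefixList, pvCsum]
    | succ i =>
      simp only [pvPrefixList, List.getElem?_cons_succ]
      rw [ih (t + pvContrib x) i (by simpa using hj)]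
      simp [pvCsum]
      ring

-- the core correspondence: differences of F at consecutive cuts = pvSpec
lemma diffs_spec (xs : List (Int × Int)) : ∀ (a k : Int) (F : Int → Int),
    (∀ i : Nat, (h : i < xs.length) → F (k + i + 1) - F (k + i) = pvContrib xs[i]) →
    pvDiffsAbs F (a :: (pvCutsRel xs k ++ [k + (xs.length : Int)])) = pvSpec xs (F k - F a) := by
  induction xs with
  | nil =>
    intro a k F _
    simp only [pvCutsRel, List.nil_append, List.length_nil, Nat.cast_zero, add_zero]
    rw [pvDiffsAbs_pair]
    simp [pvSpec]
  | cons x r ih =>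
    intro a k F hF
    have h0 : F (k + 1) - F k = pvContrib x := by
      have := hF 0 (by simp)
      simpa using this
    have hFr : ∀ i : Nat, (h : i < r.length) →
        F (k + 1 + i + 1) - F (k + 1 + i) = pvContrib r[i] := by
      intro i hi
      have := hF (i + 1) (by simpa using Nat.succ_lt_succ hi)
      have he : (k + ((i : Int) + 1) + 1) = k + 1 + i + 1 := by ring
      have he2 : (k + ((i : Int) + 1)) = k + 1 + i := by ring
      push_cast at this
      rw [he, he2] at this
      simpa using this
    have hlen : (k + ((x :: r).length : Int)) = (k + 1) + (r.length : Int) := by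
      simp; ring
    by_cases h3 : x.1 = 3
    · have hx : pvContrib x = 0 := by simp [pvContrib, h3]
      have hcut : pvCutsRel (x :: r) k = (k + 1) :: pvCutsRel r (k + 1) := by
        simp [pvCutsRel, h3]
      rw [hcut, hlen]
      rw [List.cons_append, pvDiffsAbs_cons]
      rw [ih (k + 1) (k + 1) F hFr]
      have : F (k + 1) - F a = F k - F a := by omega
      simp [pvSpec, h3, this]
    · have hcut : pvCutsRel (x :: r) k = pvCutsRel r (k + 1) := by
        simp [pvCutsRel, h3]
      rw [hcut, hlen]
      rw [ih a (k + 1) F hFr]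
      have : F (k + 1) - F a = (F k - F a) + pvContrib x := by omega
      simp [pvSpec, h3, this]

-- ===== VERDICT =====
theorem get_m_values_spec : Claim_equal_get_m_values := by
  intro ct _
  unfold Spec_get_m_values get_m_values get_m_values_alt
  by_cases hct : ct = []
  · subst hct; rfl
  · simp only [if_neg hct]
    rw [aFold_eq ct 0 (ct.length : Int) ([], 0) hct (by simp)]
    have hA : ((ct.foldl pvAbody ([], 0)).1 ++ [(ct.foldl pvAbody ([], 0)).2]) = pvSpec ct 0 := by
      simpa using aBody_spec ct [] 0
    have hpre : (ct.foldl pvBstep ([0], 0)).1 = pvPrefixList ct 0 := by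
      have := bFold_prefix ct [] 0
      simp only [List.nil_append] at this
      rw [this]
    have hcuts : pvCuts ct = 0 :: (pvCutsRel ct 0 ++ [(ct.length : Int)]) := by
      unfold pvCuts
      rw [cuts_rel ct 0]
      simp
    have hF : ∀ i : Nat, (h : i < ct.length) →
        (fun j => (PySem.List.pyGet? (pvPrefixList ct 0) j).getD 0) ((0 : Int) + i + 1) -
        (fun j => (PySem.List.pyGet? (pvPrefixList ct 0) j).getD 0) ((0 : Int) + i) = pvContrib ct[i] := by
      intro i hi
      have h1 : ((0 : Int) + i + 1) = ((i + 1 : Nat) : Int) := by push_cast; ring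
      have h2 : ((0 : Int) + i) = ((i : Nat) : Int) := by push_cast; ring
      rw [h1, h2]
      simp only [PySem.List.pyGet?_natCast]
      rw [prefixList_get ct 0 (i + 1) (by omega), prefixList_get ct 0 i (by omega)]
      have htake : ct.take (i + 1) = ct.take i ++ [ct[i]] := by
        rw [List.take_succ, List.getElem?_eq_getElem hi]
        rfl
      rw [htake]
      simp only [Option.getD_some, pvCsum, List.map_append, List.sum_append,
        List.map_cons, List.map_nil, List.sum_cons, List.sum_nil]
      ring
    simp only [hA, hpre, hcuts]
    have hdiff : pvDiffs (pvPrefixList ct 0) (0 :: (pvCutsRel ct 0 ++ [(ct.length : Int)]))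
        = pvDiffsAbs (fun j => (PySem.List.pyGet? (pvPrefixList ct 0) j).getD 0)
            (0 :: (pvCutsRel ct 0 ++ [(ct.length : Int)])) := rfl
    have hd := diffs_spec ct 0 0 (fun j => (PySem.List.pyGet? (pvPrefixList ct 0) j).getD 0) hF
    rw [zero_add] at hd
    rw [hdiff, hd]
    simp
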